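-- pv_equiv track=rewrite | github.com/JH13den/duoshap-review-artifact | data_quality_tracing/plotting/smoilm_fidelity_plot.py | collect_fieldnames
-- ===== SOURCE A (Python) =====
-- from typing import Dict, List, Tuple
--
-- def collect_fieldnames(rows: List[Dict], preferred_order: List[str]) -> List[str]:
--     seen = set()
--     out = []
--     for k in preferred_order:
--         if any(k in r for r in rows):
--             out.append(k)
--             seen.add(k)
--     for r in rows:
--         for k in r.keys():
--             if k not in seen:
--                 out.append(k)
--                 seen.add(k)
--     return out
-- ===== SOURCE B (Python) =====
-- def collect_fieldnames(rows, preferred_order):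
--     allkeys = {}
--     for r in rows:
--         for k in r.keys():
--             allkeys[k] = None
--     out = [k for k in preferred_order if k in allkeys]
--     pref = set(preferred_order)
--     for k in allkeys:
--         if k not in pref:
--             out.append(k)
--     return out
-- ===== Notes on version B (the rewrite author's own statement) =====
-- stated objective: faster
-- what changed: B builds a first-discovery key index (ordered dict) over all rows once, then derives the preferred part by a comprehension over that index and the trailing part by one pass over the index against a set of preferred names, instead of A's per-preferred-key any() rescan of all rows plus a seen-set dedup loop.
import Mathlib
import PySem

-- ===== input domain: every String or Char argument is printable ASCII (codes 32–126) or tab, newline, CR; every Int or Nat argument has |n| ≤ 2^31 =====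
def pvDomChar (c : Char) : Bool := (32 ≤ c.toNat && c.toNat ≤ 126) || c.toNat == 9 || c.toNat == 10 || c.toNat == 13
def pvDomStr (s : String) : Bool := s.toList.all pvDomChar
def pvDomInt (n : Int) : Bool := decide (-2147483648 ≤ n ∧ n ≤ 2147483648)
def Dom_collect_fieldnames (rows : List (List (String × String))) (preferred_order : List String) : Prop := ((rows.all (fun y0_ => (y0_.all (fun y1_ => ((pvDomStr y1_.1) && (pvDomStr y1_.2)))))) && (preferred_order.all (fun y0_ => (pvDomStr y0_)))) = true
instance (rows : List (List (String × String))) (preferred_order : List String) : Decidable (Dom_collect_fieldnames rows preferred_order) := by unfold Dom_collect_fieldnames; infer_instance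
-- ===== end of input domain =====

-- B replaces A's per-preferred-key rescan of all rows by one first-discovery key index
-- (`allkeys`) built once, then a comprehension over preferred plus one pass over the index.

-- ===== PORT A =====
def collect_fieldnames (rows : List (List (String × String))) (preferred_order : List String) : List String :=
  let st1 : PySem.Set String × List String :=
    preferred_order.foldl (fun st k =>
      if rows.any (fun r => (PySem.Dict.ofList r).contains k) then
        (PySem.Set.add st.1 k, st.2 ++ [k])
      else st)
      (PySem.Set.empty, [])
  let st2 : PySem.Set String × List String :=
    rows.foldl (fun st r =>
      ((PySem.Dict.ofList r).keys).foldl (fun st k =>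
        if PySem.Set.contains st.1 k then st
        else (PySem.Set.add st.1 k, st.2 ++ [k])) st) st1
  st2.2

-- ===== PORT B =====
def collect_fieldnames_alt (rows : List (List (String × String))) (preferred_order : List String) : List String :=
  let allkeys : PySem.Dict String (Option Unit) :=
    rows.foldl (fun d r =>
      ((PySem.Dict.ofList r).keys).foldl (fun d k => d.insert k none) d)
      PySem.Dict.empty
  let out : List String := preferred_order.filter (fun k => allkeys.contains k)
  let pref : PySem.Set String := PySem.Set.ofList preferred_order
  (PySem.Dict.keys allkeys).foldl (fun out k =>
    if PySem.Set.contains pref k then out else out ++ [k]) out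

-- ===== PRECONDITION & SPEC =====
def Spec_collect_fieldnames (rows : List (List (String × String))) (preferred_order : List String) (out : List String) : Prop := out = collect_fieldnames_alt rows preferred_order
instance (rows : List (List (String × String))) (preferred_order : List String) (out : List String) : Decidable (Spec_collect_fieldnames rows preferred_order out) := by unfold Spec_collect_fieldnames; infer_instance

-- ===== CLAIM (what is proved, stated in full; the proofs are below) =====
def Claim_equal_collect_fieldnames : Prop := ∀ (rows : List (List (String × String))) (preferred_order : List String), Dom_collect_fieldnames rows preferred_order → Spec_collect_fieldnames rows preferred_order (collect_fieldnames rows preferred_order)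

-- ===== LEMMAS AND PROOFS =====

-- dedup-while-iterating: the keys a seen-set loop emits from `l` starting with seen-set `s`
def pvDK : List String → PySem.Set String → List String
  | [], _ => []
  | k :: t, s => if PySem.Set.contains s k then pvDK t s else k :: pvDK t (PySem.Set.add s k)

theorem pv_foldl_nested {σ α β : Type} (rows : List α) (K : α → List β) (f : σ → β → σ) (init : σ) :
    rows.foldl (fun st r => (K r).foldl f st) init = (rows.flatMap K).foldl f init := by
  induction rows generalizing init with
  | nil => rfl
  | cons r t ih => simp [List.flatMap_cons, List.foldl_append, ih]

theorem pv_loop1_eq (P : String → Bool) (l : List String) (s : PySem.Set String) (o : List String) :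
    (l.foldl (fun st k => if P k then (PySem.Set.add st.1 k, st.2 ++ [k]) else st) (s, o))
      = (l.foldl (fun s k => if P k then PySem.Set.add s k else s) s, o ++ l.filter P) := by
  induction l generalizing s o with
  | nil => simp
  | cons k t ih =>
    by_cases h : P k = true
    · simp [h, ih]
    · simp [h, ih]

theorem pv_mem_foldl_add_if (P : String → Bool) (l : List String) (s : PySem.Set String) (y : String) :
    y ∈ l.foldl (fun s k => if P k then PySem.Set.add s k else s) s ↔ y ∈ s ∨ (y ∈ l ∧ P y = true) := by
  induction l generalizing s with
  | nil => simp
  | cons k t ih =>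
    simp only [List.foldl_cons, List.mem_cons]
    by_cases h : P k = true
    · rw [if_pos h, ih]
      simp only [PySem.Set.mem_add]
      constructor
      · rintro ((hs | rfl) | ⟨hm, hp⟩)
        · exact Or.inl hs
        · exact Or.inr ⟨Or.inl rfl, h⟩
        · exact Or.inr ⟨Or.inr hm, hp⟩
      · rintro (hs | ⟨rfl | hm, hp⟩)
        · exact Or.inl (Or.inl hs)
        · exact Or.inl (Or.inr rfl)
        · exact Or.inr ⟨hm, hp⟩
    · rw [if_neg h, ih]
      constructor
      · rintro (hs | ⟨hm, hp⟩)
        · exact Or.inl hs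
        · exact Or.inr ⟨Or.inr hm, hp⟩
      · rintro (hs | ⟨rfl | hm, hp⟩)
        · exact Or.inl hs
        · exact absurd hp h
        · exact Or.inr ⟨hm, hp⟩

theorem pv_loop2_eq (l : List String) (s : PySem.Set String) (o : List String) :
    (l.foldl (fun st k => if PySem.Set.contains st.1 k then st
        else (PySem.Set.add st.1 k, st.2 ++ [k])) (s, o)).2 = o ++ pvDK l s := by
  induction l generalizing s o with
  | nil => simp [pvDK]
  | cons k t ih =>
    by_cases h : k ∈ s
    · have hc : PySem.Set.contains s k = true := (PySem.Set.contains_iff _ _).2 h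
      simp only [List.foldl_cons, pvDK, hc, if_true]
      exact ih s o
    · have hc : PySem.Set.contains s k = false := by
        cases hcc : PySem.Set.contains s k with
        | false => rfl
        | true => exact absurd ((PySem.Set.contains_iff _ _).1 hcc) h
      simp only [List.foldl_cons, pvDK, hc, Bool.false_eq_true, if_false]
      rw [ih (PySem.Set.add s k) (o ++ [k])]
      simp

theorem pv_loopB_eq (P : String → Bool) (l : List String) (o : List String) :
    l.foldl (fun o k => if P k then o else o ++ [k]) o = o ++ l.filter (fun k => !P k) := by
  induction l generalizing o with
  | nil => simp
  | cons k t ih =>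
    by_cases h : P k = true
    · simp [h, ih]
    · simp [h, ih]

theorem pv_keys_foldl_insert (l : List String) (d : PySem.Dict String (Option Unit))
    (hnd : (PySem.Dict.keys d).Nodup) :
    (PySem.Dict.keys (l.foldl (fun d k => d.insert k none) d))
      = PySem.Dict.keys d ++ pvDK l (PySem.Dict.keys d) := by
  induction l generalizing d with
  | nil => simp [pvDK]
  | cons k t ih =>
    by_cases h : k ∈ PySem.Dict.keys d
    · have hc : PySem.Dict.contains d k = true := (PySem.Dict.contains_iff_mem_keys _ _).2 h
      have hk : PySem.Dict.keys (d.insert k none) = PySem.Dict.keys d :=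
        PySem.Dict.keys_insert_of_contains d none hc
      have hsc : PySem.Set.contains (PySem.Dict.keys d) k = true :=
        (PySem.Set.contains_iff _ _).2 h
      simp only [List.foldl_cons, pvDK, hsc, if_true]
      rw [ih (d.insert k none) (by rw [hk]; exact hnd), hk]
    · have hc : PySem.Dict.contains d k = false := by
        cases hcc : PySem.Dict.contains d k with
        | false => rfl
        | true => exact absurd ((PySem.Dict.contains_iff_mem_keys _ _).1 hcc) h
      have hk : PySem.Dict.keys (d.insert k none) = PySem.Dict.keys d ++ [k] :=
        PySem.Dict.keys_insert_of_not_contains d none hc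
      have hsc : PySem.Set.contains (PySem.Dict.keys d) k = false := by
        cases hcc : PySem.Set.contains (PySem.Dict.keys d) k with
        | false => rfl
        | true => exact absurd ((PySem.Set.contains_iff _ _).1 hcc) h
      have hadd : PySem.Set.add (PySem.Dict.keys d) k = PySem.Dict.keys d ++ [k] :=
        PySem.Set.add_of_not_mem h
      have hnd' : (PySem.Dict.keys (d.insert k none)).Nodup := by
        rw [hk, List.nodup_append]
        refine ⟨hnd, List.nodup_singleton _, ?_⟩
        intro a ha b hb heq
        subst heq
        exact h ((List.eq_of_mem_singleton hb) ▸ ha)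
      rw [List.foldl_cons, ih (d.insert k none) hnd', hk]
      show _ = _ ++ pvDK (k :: t) _
      rw [pvDK, hsc, hadd, List.append_assoc]
      rfl

theorem pv_mem_pvDK (l : List String) (s : PySem.Set String) (y : String) :
    y ∈ pvDK l s ↔ y ∈ l ∧ y ∉ s := by
  induction l generalizing s with
  | nil => simp [pvDK]
  | cons k t ih =>
    by_cases h : k ∈ s
    · have hc : PySem.Set.contains s k = true := (PySem.Set.contains_iff _ _).2 h
      simp only [pvDK, hc, if_true, ih, List.mem_cons]
      constructor
      · rintro ⟨hm, hs⟩; exact ⟨Or.inr hm, hs⟩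
      · rintro ⟨rfl | hm, hs⟩
        · exact absurd h hs
        · exact ⟨hm, hs⟩
    · have hc : PySem.Set.contains s k = false := by
        cases hcc : PySem.Set.contains s k with
        | false => rfl
        | true => exact absurd ((PySem.Set.contains_iff _ _).1 hcc) h
      simp only [pvDK, hc, Bool.false_eq_true, if_false, List.mem_cons, ih,
        PySem.Set.mem_add]
      constructor
      · rintro (rfl | ⟨hm, hs⟩)
        · exact ⟨Or.inl rfl, h⟩
        · exact ⟨Or.inr hm, fun hy => hs (Or.inl hy)⟩
      · rintro ⟨rfl | hm, hs⟩
        · exact Or.inl rfl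
        · by_cases hy : y = k
          · exact Or.inl hy
          · exact Or.inr ⟨hm, fun hys => (hys.elim hs hy)⟩

theorem pv_pvDK_congr (P : String → Bool) (l : List String) (s t : PySem.Set String)
    (h : ∀ k ∈ l, (k ∈ s ↔ k ∈ t ∨ P k = true)) :
    pvDK l s = (pvDK l t).filter (fun k => !P k) := by
  induction l generalizing s t with
  | nil => simp [pvDK]
  | cons k tl ih =>
    have hk := h k (List.mem_cons_self ..)
    by_cases ht : k ∈ t
    · have hs : k ∈ s := hk.2 (Or.inl ht)
      have hcs : PySem.Set.contains s k = true := (PySem.Set.contains_iff _ _).2 hs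
      have hct : PySem.Set.contains t k = true := (PySem.Set.contains_iff _ _).2 ht
      simp only [pvDK, hcs, hct, if_true]
      exact ih s t (fun k' hm => h k' (List.mem_cons_of_mem _ hm))
    · have hct : PySem.Set.contains t k = false := by
        cases hcc : PySem.Set.contains t k with
        | false => rfl
        | true => exact absurd ((PySem.Set.contains_iff _ _).1 hcc) ht
      by_cases hp : P k = true
      · have hs : k ∈ s := hk.2 (Or.inr hp)
        have hcs : PySem.Set.contains s k = true := (PySem.Set.contains_iff _ _).2 hs
        simp only [pvDK, hcs, hct, Bool.false_eq_true, if_true, if_false, List.filter_cons]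
        rw [if_neg (by simp [hp])]
        exact ih s (PySem.Set.add t k) (fun k' hm => by
          rw [h k' (List.mem_cons_of_mem _ hm), PySem.Set.mem_add]
          constructor
          · rintro (htm | hpm)
            · exact Or.inl (Or.inl htm)
            · exact Or.inr hpm
          · rintro ((htm | rfl) | hpm)
            · exact Or.inl htm
            · exact Or.inr hp
            · exact Or.inr hpm)
      · have hs : k ∉ s := fun hsm => (hk.1 hsm).elim ht hp
        have hcs : PySem.Set.contains s k = false := by
          cases hcc : PySem.Set.contains s k with
          | false => rfl
          | true => exact absurd ((PySem.Set.contains_iff _ _).1 hcc) hs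
        simp only [pvDK, hcs, hct, Bool.false_eq_true, if_false, List.filter_cons]
        rw [if_pos (by simp [hp])]
        congr 1
        exact ih (PySem.Set.add s k) (PySem.Set.add t k) (fun k' hm => by
          rw [PySem.Set.mem_add, PySem.Set.mem_add, h k' (List.mem_cons_of_mem _ hm)]
          tauto)

-- ===== VERDICT (by name: the statement is the Claim_ definition above) =====
theorem collect_fieldnames_spec : Claim_equal_collect_fieldnames := by
  intro rows preferred_order _
  simp only [Spec_collect_fieldnames, collect_fieldnames, collect_fieldnames_alt]
  set K : List (String × String) → List String := fun r => (PySem.Dict.ofList r).keys with hK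
  set flat : List String := rows.flatMap K with hflat
  set P : String → Bool := fun k => rows.any (fun r => (PySem.Dict.ofList r).contains k) with hP
  have hmemflat : ∀ y, y ∈ flat ↔ P y = true := by
    intro y
    simp only [hflat, hP, List.mem_flatMap, List.any_eq_true, hK]
    constructor
    · rintro ⟨r, hr, hm⟩; exact ⟨r, hr, (PySem.Dict.contains_iff_mem_keys _ _).2 hm⟩
    · rintro ⟨r, hr, hc⟩; exact ⟨r, hr, (PySem.Dict.contains_iff_mem_keys _ _).1 hc⟩
  rw [pv_foldl_nested rows K _ _, ← hflat]
  rw [pv_loop1_eq P preferred_order PySem.Set.empty []]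
  rw [pv_loop2_eq flat _ _]
  rw [pv_foldl_nested rows K _ _, ← hflat]
  have hkeys : PySem.Dict.keys (flat.foldl (fun d k => d.insert k none) (PySem.Dict.empty : PySem.Dict String (Option Unit)))
      = pvDK flat PySem.Set.empty := by
    rw [pv_keys_foldl_insert flat PySem.Dict.empty (by rw [PySem.Dict.keys_empty]; exact List.nodup_nil)]
    rw [PySem.Dict.keys_empty]
    rfl
  rw [hkeys, pv_loopB_eq]
  have hhead : List.filter P preferred_order
      = preferred_order.filter (fun k =>
          PySem.Dict.contains (flat.foldl (fun d k => d.insert k none) (PySem.Dict.empty : PySem.Dict String (Option Unit))) k) := by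
    apply List.filter_congr
    intro k _
    rw [Bool.eq_iff_iff, PySem.Dict.contains_iff_mem_keys, hkeys, pv_mem_pvDK]
    simp [hmemflat k]
  rw [List.nil_append, hhead]
  congr 1
  apply pv_pvDK_congr
  intro k hkf
  rw [pv_mem_foldl_add_if]
  have hpk : P k = true := (hmemflat k).1 hkf
  simp [PySem.Set.mem_ofList, hpk]
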